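-- pv_equiv track=rewrite | github.com/tigger0721-hub/PROJECTLUNA | backend/app/legacy_api.py | _sanitize_internal_field_terms
-- ===== SOURCE A (Python) =====
-- def _sanitize_internal_field_terms(text: str) -> str:
--     sanitized = str(text or "")
--     replacements = {
--         "activeSupport": "핵심 지지선",
--         "activeResistance": "위쪽 저항",
--         "trendState": "추세 상태",
--         "reclaimLevel": "회복 기준 가격대",
--         "breakoutLevel": "돌파 확인 가격대",
--     }
--     for raw_key, korean_label in replacements.items():
--         sanitized = sanitized.replace(raw_key, korean_label)
--     return sanitized
-- ===== SOURCE B (Python) =====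
-- _KOREAN_LABELS = (
--     ("activeSupport", "핵심 지지선"),
--     ("activeResistance", "위쪽 저항"),
--     ("trendState", "추세 상태"),
--     ("reclaimLevel", "회복 기준 가격대"),
--     ("breakoutLevel", "돌파 확인 가격대"),
-- )
--
--
-- def _sanitize_internal_field_terms(text: str) -> str:
--     sanitized = str(text or "")
--     out = []
--     i = 0
--     n = len(sanitized)
--     while i < n:
--         for raw_key, korean_label in _KOREAN_LABELS:
--             if sanitized.startswith(raw_key, i):
--                 out.append(korean_label)
--                 i += len(raw_key)
--                 break
--         else:
--             out.append(sanitized[i])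
--             i += 1
--     return "".join(out)
-- ===== Notes on version B (the rewrite author's own statement) =====
-- stated objective: alternative
-- what changed: A runs five independent full str.replace passes over the text (one per dict entry); B makes a single left-to-right scan that at each position looks for the first matching key in the table, emits its Korean label and jumps past it, so the text is traversed once.
import Mathlib
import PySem

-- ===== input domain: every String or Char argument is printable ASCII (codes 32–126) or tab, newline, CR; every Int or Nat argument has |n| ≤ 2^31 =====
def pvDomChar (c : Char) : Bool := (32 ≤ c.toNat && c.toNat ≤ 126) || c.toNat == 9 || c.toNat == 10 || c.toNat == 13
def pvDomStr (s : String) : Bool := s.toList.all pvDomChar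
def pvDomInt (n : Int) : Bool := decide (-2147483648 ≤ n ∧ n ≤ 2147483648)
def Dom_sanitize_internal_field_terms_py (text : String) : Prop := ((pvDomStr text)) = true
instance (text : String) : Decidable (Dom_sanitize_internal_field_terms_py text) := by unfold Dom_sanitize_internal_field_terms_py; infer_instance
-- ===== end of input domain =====

-- B replaces A's five full str.replace passes by ONE left-to-right scan with a first-match table
-- lookup at each position (objective: alternative single-pass algorithm, same results).

-- ===== PORT A =====
-- A: sanitized = str(text or ""), then one str.replace pass per dict entry, in insertion order.
def sanitize_internal_field_terms_py (text : String) : String :=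
  let sanitized : String := if text == "" then "" else text   -- str(text or "") on a str argument
  let replacements : PySem.Dict String String :=
    (((((PySem.Dict.empty).insert "activeSupport" "핵심 지지선").insert
        "activeResistance" "위쪽 저항").insert
        "trendState" "추세 상태").insert
        "reclaimLevel" "회복 기준 가격대").insert
        "breakoutLevel" "돌파 확인 가격대"
  replacements.items.foldl (fun s kv => PySem.Str.replace s kv.1 kv.2) sanitized

-- ===== PORT B =====
-- Source B's replacements dict, in insertion order, on the char-list level
def pvPairsB : List (List Char × List Char) :=
  [("activeSupport".toList, "핵심 지지선".toList),
   ("activeResistance".toList, "위쪽 저항".toList),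
   ("trendState".toList, "추세 상태".toList),
   ("reclaimLevel".toList, "회복 기준 가격대".toList),
   ("breakoutLevel".toList, "돌파 확인 가격대".toList)]

-- Source B's inner `for key, label … break / else`: the first key of the table that matches at the
-- current position (s.startswith(key, i) on the remaining suffix); exact for these semantics
def pvFirstKeyB : List (List Char × List Char) → List Char → Option (List Char × List Char)
  | [], _ => none
  | (k, v) :: rest, s => if k.isPrefixOf s then some (k, v) else pvFirstKeyB rest s

-- Source B's `while i < n` scan: the remaining suffix plays the role of the index i, and the fuel
-- |s| bounds the number of iterations (each step consumes ≥ 1 char); exact for Source B's loop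
def pvScanB : Nat → List Char → List Char
  | 0, l => l
  | _ + 1, [] => []
  | fuel + 1, c :: t =>
    match pvFirstKeyB pvPairsB (c :: t) with
    | some (k, v) => v ++ pvScanB fuel ((c :: t).drop k.length)
    | none => c :: pvScanB fuel t

def sanitize_internal_field_terms_py_alt (text : String) : String :=
  let sanitized : String := if text == "" then "" else text   -- str(text or "")
  String.ofList (pvScanB sanitized.toList.length sanitized.toList)

-- ===== PRECONDITION & SPEC =====
def Spec_sanitize_internal_field_terms_py (text : String) (out : String) : Prop := out = sanitize_internal_field_terms_py_alt text
instance (text : String) (out : String) : Decidable (Spec_sanitize_internal_field_terms_py text out) := by unfold Spec_sanitize_internal_field_terms_py; infer_instance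

-- ===== CLAIM (what is proved, stated in full; the proofs are below) =====
def Claim_equal_sanitize_internal_field_terms_py : Prop := ∀ (text : String), Dom_sanitize_internal_field_terms_py text → Spec_sanitize_internal_field_terms_py text (sanitize_internal_field_terms_py text)

-- ===== LEMMAS AND PROOFS =====

-- acc-free mirror of PySem.Chars.replace.go
def pvRepGo (old new : List Char) : Nat → List Char → List Char
  | 0, l => l
  | _ + 1, [] => []
  | fuel + 1, c :: t =>
    if old.isPrefixOf (c :: t) then new ++ pvRepGo old new fuel ((c :: t).drop old.length)
    else c :: pvRepGo old new fuel t

theorem pvRepGo_eq_go (old new : List Char) :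
    ∀ (fuel : Nat) (l acc : List Char),
      PySem.Chars.replace.go old new fuel l acc = acc.reverse ++ pvRepGo old new fuel l := by
  intro fuel
  induction fuel with
  | zero => intro l acc; simp [PySem.Chars.replace.go, pvRepGo]
  | succ f ih =>
    intro l acc
    cases l with
    | nil => simp [PySem.Chars.replace.go, pvRepGo]
    | cons c t =>
      by_cases h : old.isPrefixOf (c :: t)
      · simp [PySem.Chars.replace.go, pvRepGo, h, ih]
      · simp [PySem.Chars.replace.go, pvRepGo, h, ih]

theorem pvReplace_eq (old new s : List Char) (h : old ≠ []) :
    PySem.Chars.replace s old new = pvRepGo old new s.length s := by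
  have : old.isEmpty = false := by simpa using h
  simp [PySem.Chars.replace, this, pvRepGo_eq_go]

theorem pvRepGo_fuel_succ (old new : List Char) (h : old ≠ []) :
    ∀ (fuel : Nat) (l : List Char), l.length ≤ fuel →
      pvRepGo old new (fuel + 1) l = pvRepGo old new fuel l := by
  intro fuel
  induction fuel with
  | zero =>
    intro l hl
    have hnil : l = [] := by cases l <;> simp_all
    subst hnil; simp [pvRepGo]
  | succ f ih =>
    intro l hl
    cases l with
    | nil => simp [pvRepGo]
    | cons c t =>
      have hone : 1 ≤ old.length := by cases old <;> simp_all
      simp only [List.length_cons] at hl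
      by_cases hp : old.isPrefixOf (c :: t)
      · simp only [pvRepGo, hp, if_true]
        rw [ih (List.drop old.length (c :: t))
          (by simp only [List.length_drop, List.length_cons]; omega)]
      · simp only [pvRepGo, hp, Bool.false_eq_true, if_false]
        rw [ih t (by omega)]

theorem pvRepGo_fuel (old new : List Char) (h : old ≠ []) :
    ∀ (fuel : Nat) (l : List Char), l.length ≤ fuel →
      pvRepGo old new fuel l = pvRepGo old new l.length l := by
  intro fuel
  induction fuel with
  | zero => intro l hl; have : l.length = 0 := by omega
            rw [this]
  | succ f ih =>
    intro l hl
    rcases Nat.lt_or_ge l.length (f + 1) with hlt | hge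
    · have hle : l.length ≤ f := by omega
      rw [pvRepGo_fuel_succ old new h f l hle]; exact ih l hle
    · have : l.length = f + 1 := by omega
      rw [this]

-- the three Python-level equations of s.replace(old, new), old ≠ ''
theorem pvRep_nil (old new : List Char) (h : old ≠ []) :
    PySem.Chars.replace [] old new = [] := by
  simp [pvReplace_eq _ _ _ h, pvRepGo]

theorem pvRep_pref (old new s : List Char) (h : old ≠ []) (hp : old <+: s) :
    PySem.Chars.replace s old new = new ++ PySem.Chars.replace (s.drop old.length) old new := by
  have hone : 1 ≤ old.length := by cases old <;> simp_all
  cases s with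
  | nil => exact absurd (List.prefix_nil.mp hp) h
  | cons c t =>
    rw [pvReplace_eq _ _ _ h, pvReplace_eq _ _ _ h]
    have hp' : old.isPrefixOf (c :: t) := List.isPrefixOf_iff_prefix.mpr hp
    simp only [List.length_cons, pvRepGo, hp', if_true]
    congr 1
    apply pvRepGo_fuel old new h
    simp only [List.length_drop, List.length_cons]
    omega

theorem pvRep_cons (old new : List Char) (c : Char) (t : List Char)
    (h : ¬ old <+: (c :: t)) :
    PySem.Chars.replace (c :: t) old new = c :: PySem.Chars.replace t old new := by
  have hne : old ≠ [] := by rintro rfl; exact h (List.nil_prefix)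
  rw [pvReplace_eq _ _ _ hne, pvReplace_eq _ _ _ hne]
  have hp' : old.isPrefixOf (c :: t) = false := by
    rw [← Bool.not_eq_true, List.isPrefixOf_iff_prefix]; exact h
  simp [pvRepGo, hp']

theorem pvPrefix_split {k a x : List Char} (h : k <+: a ++ x) : k <+: a ∨ a <+: k :=
  List.prefix_or_prefix_of_prefix h (List.prefix_append a x)

-- replace passes unchanged through a leading block `a` no suffix of which interacts with `old`
theorem pvRep_append (old new : List Char) :
    ∀ (a : List Char),
      (∀ p, p < a.length → ¬ (a.drop p <+: old) ∧ ¬ (old <+: a.drop p)) →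
      ∀ x, PySem.Chars.replace (a ++ x) old new = a ++ PySem.Chars.replace x old new := by
  intro a
  induction a with
  | nil => intro _ x; simp
  | cons c a' ih =>
    intro H x
    have h0 := H 0 (by simp)
    simp only [List.drop_zero] at h0
    have hnp : ¬ old <+: (c :: a') ++ x := by
      intro hk
      rcases pvPrefix_split hk with hk | hk
      · exact h0.2 hk
      · exact h0.1 hk
    rw [List.cons_append, pvRep_cons old new c (a' ++ x) (by simpa using hnp)]
    rw [ih (fun p hp => by simpa using H (p + 1) (by simpa using hp)) x]
    simp

-- a word made of characters foreign to `new` that prefixes the output already prefixed the input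
theorem pvRep_reflect (old new : List Char) (h : old ≠ []) (hn : new ≠ []) :
    ∀ (n : Nat) (s w : List Char), s.length ≤ n →
      (∀ ch ∈ new, ch ∉ w) → w <+: PySem.Chars.replace s old new → w <+: s := by
  intro n
  induction n with
  | zero =>
    intro s w hl _ hw
    have hnil : s = [] := by cases s <;> simp_all
    subst hnil
    rw [pvRep_nil _ _ h] at hw
    exact hw
  | succ n ih =>
    intro s w hl hch hw
    cases s with
    | nil =>
      rw [pvRep_nil _ _ h] at hw
      exact hw
    | cons c t =>
      by_cases hp : old <+: (c :: t)
      · rw [pvRep_pref _ _ _ h hp] at hw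
        have hwnil : w = [] := by
          rcases pvPrefix_split hw with hw' | hw'
          · cases w with
            | nil => rfl
            | cons d w' =>
              exfalso
              have hd : d ∈ new := hw'.subset (by simp)
              exact hch d hd (by simp)
          · cases new with
            | nil => exact absurd rfl hn
            | cons e n' =>
              exfalso
              have he : e ∈ w := hw'.subset (by simp)
              exact hch e (by simp) he
        subst hwnil
        exact List.nil_prefix
      · rw [pvRep_cons _ _ _ _ hp] at hw
        cases w with
        | nil => exact List.nil_prefix
        | cons d w' =>
          rw [List.cons_prefix_cons] at hw ⊢
          refine ⟨hw.1, ih t w' (by simpa using hl) (fun ch hc => ?_) hw.2⟩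
          intro hmem
          exact hch ch hc (by simp [hmem])

theorem pvFirstKeyB_none : ∀ {ps : List (List Char × List Char)} {s : List Char},
    pvFirstKeyB ps s = none → ∀ kv ∈ ps, ¬ kv.1 <+: s := by
  intro ps
  induction ps with
  | nil => intro s _ kv hkv; simp at hkv
  | cons kv0 rest ih =>
    intro s hnone kv hkv
    obtain ⟨k0, v0⟩ := kv0
    by_cases hp : k0.isPrefixOf s
    · simp [pvFirstKeyB, hp] at hnone
    · simp only [pvFirstKeyB, hp, Bool.false_eq_true, if_false] at hnone
      rcases List.mem_cons.mp hkv with h1 | h1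
      · subst h1; simpa [List.isPrefixOf_iff_prefix] using hp
      · exact ih hnone kv h1

theorem pvFirstKeyB_some : ∀ {ps : List (List Char × List Char)} {s : List Char}
    {k v : List Char}, pvFirstKeyB ps s = some (k, v) →
    ∃ pre post, ps = pre ++ (k, v) :: post ∧ (∀ kv ∈ pre, ¬ kv.1 <+: s) ∧ k <+: s := by
  intro ps
  induction ps with
  | nil => intro s k v h; simp [pvFirstKeyB] at h
  | cons kv0 rest ih =>
    intro s k v h
    obtain ⟨k0, v0⟩ := kv0
    by_cases hp : k0.isPrefixOf s
    · simp only [pvFirstKeyB, hp, if_true, Option.some.injEq, Prod.mk.injEq] at h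
      refine ⟨[], rest, by simp [h.1, h.2], by simp, ?_⟩
      rw [← h.1]
      exact List.isPrefixOf_iff_prefix.mp hp
    · simp only [pvFirstKeyB, hp, Bool.false_eq_true, if_false] at h
      obtain ⟨pre, post, hsplit, hpre, hk⟩ := ih h
      refine ⟨(k0, v0) :: pre, post, by simp [hsplit], ?_, hk⟩
      intro kv hkv
      rcases List.mem_cons.mp hkv with h1 | h1
      · subst h1; simpa [List.isPrefixOf_iff_prefix] using hp
      · exact hpre kv h1

-- the sequence of replace passes of A, on the char level
def pvSeqRep (ps : List (List Char × List Char)) (s : List Char) : List Char :=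
  ps.foldl (fun acc kv => PySem.Chars.replace acc kv.1 kv.2) s

-- concrete table facts
theorem pvKeysNe : ∀ kv ∈ pvPairsB, kv.1 ≠ [] ∧ kv.2 ≠ [] := by decide

theorem pvLabelsFreshB : (pvPairsB.all (fun kv => pvPairsB.all (fun kv' =>
    kv.2.all (fun ch => !kv'.1.contains ch)))) = true := by rfl

theorem pvLabelsFresh : ∀ kv ∈ pvPairsB, ∀ kv' ∈ pvPairsB, ∀ ch ∈ kv.2, ch ∉ kv'.1 := by
  have h := pvLabelsFreshB
  simp only [List.all_eq_true, Bool.not_eq_true', List.contains_eq_mem,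
    decide_eq_false_iff_not] at h
  exact h

theorem pvNoEarlierOverlapB : ((List.range pvPairsB.length).all (fun i => (List.range i).all (fun j =>
    (List.range (pvPairsB[i]!.1.length)).all (fun p =>
      !(pvPairsB[i]!.1.drop p).isPrefixOf pvPairsB[j]!.1 &&
      !pvPairsB[j]!.1.isPrefixOf (pvPairsB[i]!.1.drop p))))) = true := by rfl

theorem pvNoEarlierOverlap : pvPairsB.Pairwise (fun a b => ∀ p, p < b.1.length →
    ¬ (b.1.drop p <+: a.1) ∧ ¬ (a.1 <+: b.1.drop p)) := by
  rw [List.pairwise_iff_getElem]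
  intro i j hi hj hij p hp
  have h := pvNoEarlierOverlapB
  simp only [List.all_eq_true, List.mem_range] at h
  have h2 := h j hj i hij p
  rw [getElem!_pos pvPairsB j hj, getElem!_pos pvPairsB i hi] at h2
  have h3 := h2 hp
  simp only [Bool.and_eq_true, Bool.not_eq_true'] at h3
  rw [← List.isPrefixOf_iff_prefix, ← List.isPrefixOf_iff_prefix]
  simp [h3.1, h3.2]

-- a block disjoint in characters from a key neither prefixes it nor is prefixed by it
theorem pvDisjNoPrefix {v' kk x : List Char} (hfresh : ∀ ch ∈ v', ch ∉ kk)
    (hsub : x ⊆ v') (hx : x ≠ []) (hk : kk ≠ []) :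
    ¬ (x <+: kk) ∧ ¬ (kk <+: x) := by
  constructor
  · intro hpk
    cases x with
    | nil => exact hx rfl
    | cons d x' => exact hfresh d (hsub (by simp)) (hpk.subset (by simp))
  · intro hpk
    cases kk with
    | nil => exact hk rfl
    | cons d k' => exact hfresh d (hsub (hpk.subset (by simp))) (by simp)

-- a whole sequence of replace passes goes through a non-interacting leading block
theorem pvSeqRep_append_block (a : List Char) :
    ∀ (ps : List (List Char × List Char)),
      (∀ kv ∈ ps, kv.1 ≠ [] ∧ ∀ p, p < a.length →
        ¬ (a.drop p <+: kv.1) ∧ ¬ (kv.1 <+: a.drop p)) →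
      ∀ x, pvSeqRep ps (a ++ x) = a ++ pvSeqRep ps x := by
  intro ps
  induction ps with
  | nil => intro _ x; simp [pvSeqRep]
  | cons kv rest ih =>
    intro H x
    obtain ⟨hne, hblk⟩ := H kv (by simp)
    show pvSeqRep rest (PySem.Chars.replace (a ++ x) kv.1 kv.2) = _
    rw [pvRep_append kv.1 kv.2 a hblk x]
    exact ih (fun kv' h => H kv' (by simp [h])) _

-- invariant of case (ii): no key ever comes to prefix `c :: u` during the passes
theorem pvPhi_preserved {c : Char} {u : List Char} {k0 v0 : List Char}
    (hmem : (k0, v0) ∈ pvPairsB)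
    (hPhi : ∀ kv ∈ pvPairsB, ¬ kv.1 <+: c :: u) :
    ∀ kv ∈ pvPairsB, ¬ kv.1 <+: c :: PySem.Chars.replace u k0 v0 := by
  intro kv hkv hpre
  obtain ⟨hk0ne, hv0ne⟩ := pvKeysNe (k0, v0) hmem
  have hkne : kv.1 ≠ [] := (pvKeysNe kv hkv).1
  cases hk : kv.1 with
  | nil => exact hkne hk
  | cons d k' =>
    rw [hk, List.cons_prefix_cons] at hpre
    have hrefl := pvRep_reflect k0 v0 hk0ne hv0ne u.length u k' le_rfl
      (fun ch hc hmem' => pvLabelsFresh (k0, v0) hmem kv hkv ch hc (by simp [hk, hmem']))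
      hpre.2
    exact hPhi kv hkv (by rw [hk, List.cons_prefix_cons]; exact ⟨hpre.1, hrefl⟩)

theorem pvSeqRep_cons (c : Char) :
    ∀ (qs : List (List Char × List Char)), qs ⊆ pvPairsB →
      ∀ u, (∀ kv ∈ pvPairsB, ¬ kv.1 <+: c :: u) →
      pvSeqRep qs (c :: u) = c :: pvSeqRep qs u := by
  intro qs
  induction qs with
  | nil => intro _ u _; simp [pvSeqRep]
  | cons kv0 rest ih =>
    intro hsub u hPhi
    obtain ⟨k0, v0⟩ := kv0
    have hmem : (k0, v0) ∈ pvPairsB := hsub (by simp)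
    show pvSeqRep rest (PySem.Chars.replace (c :: u) k0 v0) = c :: pvSeqRep rest (PySem.Chars.replace u k0 v0)
    rw [pvRep_cons k0 v0 c u (hPhi (k0, v0) hmem)]
    exact ih (fun kv h => hsub (by simp [h])) _ (pvPhi_preserved hmem hPhi)

theorem pvSeqRep_nil : ∀ (ps : List (List Char × List Char)),
    (∀ kv ∈ ps, kv.1 ≠ []) → pvSeqRep ps [] = [] := by
  intro ps
  induction ps with
  | nil => simp [pvSeqRep]
  | cons kv rest ih =>
    intro H
    show pvSeqRep rest (PySem.Chars.replace [] kv.1 kv.2) = []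
    rw [pvRep_nil _ _ (H kv (by simp))]
    exact ih (fun kv' h => H kv' (by simp [h]))

theorem pvScanB_fuel_succ : ∀ (fuel : Nat) (l : List Char), l.length ≤ fuel →
    pvScanB (fuel + 1) l = pvScanB fuel l := by
  intro fuel
  induction fuel with
  | zero =>
    intro l hl
    have hnil : l = [] := by cases l <;> simp_all
    subst hnil; simp [pvScanB]
  | succ f ih =>
    intro l hl
    cases l with
    | nil => simp [pvScanB]
    | cons c t =>
      cases hfk : pvFirstKeyB pvPairsB (c :: t) with
      | some kv =>
        obtain ⟨k, v⟩ := kv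
        obtain ⟨pre, post, hsplit, _, hk⟩ := pvFirstKeyB_some hfk
        have hkmem : (k, v) ∈ pvPairsB := by rw [hsplit]; simp
        have hkne : k ≠ [] := (pvKeysNe _ hkmem).1
        have hone : 1 ≤ k.length := by cases k <;> simp_all
        simp only [pvScanB, hfk]
        congr 1
        apply ih
        simp only [List.length_drop, List.length_cons]
        simp only [List.length_cons] at hl
        omega
      | none =>
        simp only [pvScanB, hfk]
        congr 1
        apply ih
        simp only [List.length_cons] at hl
        omega

theorem pvScanB_fuel : ∀ (fuel : Nat) (l : List Char), l.length ≤ fuel →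
    pvScanB fuel l = pvScanB l.length l := by
  intro fuel
  induction fuel with
  | zero => intro l hl; have : l.length = 0 := by omega
            rw [this]
  | succ f ih =>
    intro l hl
    rcases Nat.lt_or_ge l.length (f + 1) with hlt | hge
    · have hle : l.length ≤ f := by omega
      rw [pvScanB_fuel_succ f l hle]; exact ih l hle
    · have : l.length = f + 1 := by omega
      rw [this]

theorem pvMain : ∀ (n : Nat) (s : List Char), s.length ≤ n →
    pvSeqRep pvPairsB s = pvScanB s.length s := by
  intro n
  induction n with
  | zero =>
    intro s hl
    have hnil : s = [] := by cases s <;> simp_all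
    subst hnil
    rw [pvSeqRep_nil pvPairsB (fun kv h => (pvKeysNe kv h).1)]
    simp [pvScanB]
  | succ n ih =>
    intro s hl
    cases s with
    | nil =>
      rw [pvSeqRep_nil pvPairsB (fun kv h => (pvKeysNe kv h).1)]
      simp [pvScanB]
    | cons c t =>
      cases hfk : pvFirstKeyB pvPairsB (c :: t) with
      | some kv =>
        obtain ⟨k, v⟩ := kv
        obtain ⟨pre, post, hsplit, hpre, hk⟩ := pvFirstKeyB_some hfk
        have hkmem : (k, v) ∈ pvPairsB := by rw [hsplit]; simp
        have hkne : k ≠ [] := (pvKeysNe _ hkmem).1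
        have hone : 1 ≤ k.length := by cases k <;> simp_all
        obtain ⟨r, hr⟩ := hk
        have hlen : k.length + r.length = t.length + 1 := by
          have := congrArg List.length hr; simpa using this
        simp only [List.length_cons] at hl
        have hrlen : r.length ≤ n := by omega
        -- pairwise facts specialised to pre vs (k, v) and key facts for pre/post
        have hpw := pvNoEarlierOverlap
        rw [hsplit, List.pairwise_append] at hpw
        have hpreblk : ∀ kv' ∈ pre, kv'.1 ≠ [] ∧ ∀ p, p < k.length →
            ¬ (k.drop p <+: kv'.1) ∧ ¬ (kv'.1 <+: k.drop p) := by
          intro kv' h'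
          refine ⟨(pvKeysNe kv' (by rw [hsplit]; simp [h'])).1, ?_⟩
          exact hpw.2.2 kv' h' (k, v) (by simp)
        -- step 1: the earlier passes slide over the matched key k
        have hstep1 : pvSeqRep pre (k ++ r) = k ++ pvSeqRep pre r :=
          pvSeqRep_append_block k pre hpreblk r
        -- step 3 block facts: later passes slide over the inserted label v
        have hpostblk : ∀ kv' ∈ post, kv'.1 ≠ [] ∧ ∀ p, p < v.length →
            ¬ (v.drop p <+: kv'.1) ∧ ¬ (kv'.1 <+: v.drop p) := by
          intro kv' h'
          have h'mem : kv' ∈ pvPairsB := by rw [hsplit]; simp [h']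
          have hk'ne : kv'.1 ≠ [] := (pvKeysNe kv' h'mem).1
          refine ⟨hk'ne, fun p hp => ?_⟩
          refine pvDisjNoPrefix (v' := v) (pvLabelsFresh (k, v) hkmem kv' h'mem)
            (List.drop_subset p v) ?_ hk'ne
          intro hdrop
          rw [← List.length_eq_zero_iff] at hdrop
          rw [List.length_drop] at hdrop
          omega
        have hchain : pvSeqRep post (PySem.Chars.replace (pvSeqRep pre r) k v)
            = pvSeqRep pvPairsB r := by
          rw [hsplit]; simp [pvSeqRep, List.foldl_append]
        have hdrop_eq : (c :: t).drop k.length = r := by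
          rw [← hr, List.drop_left]
        have hscan : pvScanB (c :: t).length (c :: t) = v ++ pvScanB r.length r := by
          simp only [List.length_cons, pvScanB, hfk]
          rw [hdrop_eq]
          congr 1
          apply pvScanB_fuel
          omega
        rw [hscan, ← hr]
        have hsplitSeq : pvSeqRep pvPairsB (k ++ r) = pvSeqRep post
            (PySem.Chars.replace (pvSeqRep pre (k ++ r)) k v) := by
          rw [hsplit]; simp [pvSeqRep, List.foldl_append]
        rw [hsplitSeq, hstep1, pvRep_pref k v _ hkne (List.prefix_append k _), List.drop_left,
            pvSeqRep_append_block v post hpostblk, hchain, ih r hrlen]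
      | none =>
        have hPhi := pvFirstKeyB_none hfk
        rw [pvSeqRep_cons c pvPairsB (fun x h => h) t hPhi]
        simp only [List.length_cons, pvScanB, hfk]
        congr 1
        exact ih t (by simpa using hl)

theorem pvSan_id (text : String) : (if text == "" then "" else text) = text := by
  by_cases h : text == "" <;> simp_all

theorem pvA_toList (text : String) :
    (sanitize_internal_field_terms_py text).toList = pvSeqRep pvPairsB text.toList := by
  simp only [sanitize_internal_field_terms_py]
  rw [pvSan_id]
  have hitems : ((((((PySem.Dict.empty).insert "activeSupport" "핵심 지지선").insert
        "activeResistance" "위쪽 저항").insert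
        "trendState" "추세 상태").insert
        "reclaimLevel" "회복 기준 가격대").insert
        "breakoutLevel" "돌파 확인 가격대" : PySem.Dict String String).items
      = [("activeSupport", "핵심 지지선"), ("activeResistance", "위쪽 저항"),
         ("trendState", "추세 상태"), ("reclaimLevel", "회복 기준 가격대"),
         ("breakoutLevel", "돌파 확인 가격대")] := by rfl
  rw [hitems]
  simp [pvSeqRep, pvPairsB, List.foldl, PySem.Str.toList_replace]

-- ===== VERDICT (by name: the statement is the Claim_ definition above) =====
theorem sanitize_internal_field_terms_py_spec : Claim_equal_sanitize_internal_field_terms_py := by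
  intro text _
  show _ = _
  apply String.toList_inj.mp
  rw [pvA_toList]
  unfold sanitize_internal_field_terms_py_alt
  rw [pvSan_id, String.toList_ofList]
  exact pvMain text.toList.length text.toList le_rfl
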